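-- pv_equiv track=rewrite | github.com/zimtyler/pdfTextExtraction | func/pdfToRefDict.py | ProperSortString
-- ===== SOURCE A (Python) =====
-- def ProperSortString(smushedBlox, lineSpaceVal=5):
--     final_sort = []
--     subfinal_sort = []
--     for ix, item in enumerate(smushedBlox):
--
--         if ix == 0:
--             subfinal_sort.append(item)
--
--         elif item[3] == smushedBlox[ix-1][3]:
--             subfinal_sort.append(item)
--
--         elif abs(item[3] - smushedBlox[ix-1][3]) <= lineSpaceVal:
--             subfinal_sort.append(item)
--
--         else:
--             subfinal_sort.sort(key = lambda x: x[0])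
--             final_sort.append(subfinal_sort)
--             subfinal_sort = []
--             subfinal_sort.append(item)
--
--     subfinal_sort.sort(key= lambda x: x[0])
--     final_sort.append(subfinal_sort)
--
--     flattenFinalSort = [item[4] for items in final_sort for item in items]
--
--     return flattenFinalSort
-- ===== SOURCE B (Python) =====
-- def ProperSortString(smushedBlox, lineSpaceVal=5):
--     breaks = [not (b[3] == a[3] or abs(b[3] - a[3]) <= lineSpaceVal)
--               for a, b in zip(smushedBlox, smushedBlox[1:])]
--     labels = [0]
--     for br in breaks:
--         labels.append(labels[-1] + (1 if br else 0))
--     pairs = sorted(zip(labels, smushedBlox), key=lambda p: (p[0], p[1][0]))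
--     return [item[4] for _, item in pairs]
-- ===== Notes on version B (the rewrite author's own statement) =====
-- stated objective: alternative
-- what changed: Instead of accumulating per-line sublists and sorting each group inside the grouping loop, B computes break flags by zipping the list with its tail, turns them into integer line labels by a running sum, and performs one global stable sort of (label, item) pairs by the composite key (label, x), reading off the strings.
import Mathlib
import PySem

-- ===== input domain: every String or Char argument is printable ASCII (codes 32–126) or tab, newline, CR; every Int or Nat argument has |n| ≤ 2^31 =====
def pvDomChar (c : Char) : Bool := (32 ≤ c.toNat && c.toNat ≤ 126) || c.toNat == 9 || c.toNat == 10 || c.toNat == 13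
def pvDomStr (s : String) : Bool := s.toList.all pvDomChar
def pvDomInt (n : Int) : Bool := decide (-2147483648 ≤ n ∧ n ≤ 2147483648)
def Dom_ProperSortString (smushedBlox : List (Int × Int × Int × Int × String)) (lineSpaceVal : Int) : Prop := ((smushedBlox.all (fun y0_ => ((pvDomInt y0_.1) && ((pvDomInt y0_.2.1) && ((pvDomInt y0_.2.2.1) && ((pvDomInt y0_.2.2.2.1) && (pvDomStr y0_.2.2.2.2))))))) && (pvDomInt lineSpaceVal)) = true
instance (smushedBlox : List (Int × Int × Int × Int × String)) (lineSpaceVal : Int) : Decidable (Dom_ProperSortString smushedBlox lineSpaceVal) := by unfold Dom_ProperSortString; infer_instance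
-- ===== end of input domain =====

-- B replaces A's per-group in-loop sorts by break flags from zipping the list with its tail,
-- running-sum line labels, and ONE global stable sort on the composite key (label, x) —
-- an alternative algorithm, not claimed faster.

abbrev PvItem : Type := Int × Int × Int × Int × String

-- ===== PORT A =====
def ProperSortString (smushedBlox : List PvItem) (lineSpaceVal : Int) : List String :=
  let d0 : PvItem := (0, 0, 0, 0, "")
  let st := (PySem.List.enumerate smushedBlox 0).foldl
    (fun (st : List (List PvItem) × List PvItem) p =>
      let ix := p.1
      let item := p.2
      if ix == 0 then (st.1, st.2 ++ [item])
      else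
        let prev := PySem.List.pyGetD smushedBlox (ix - 1) d0
        if item.2.2.2.1 == prev.2.2.2.1 then (st.1, st.2 ++ [item])
        else if |item.2.2.2.1 - prev.2.2.2.1| ≤ lineSpaceVal then (st.1, st.2 ++ [item])
        else (st.1 ++ [PySem.List.sorted st.2 (fun x => x.1)], [item]))
    ([], [])
  let final_sort := st.1 ++ [PySem.List.sorted st.2 (fun x => x.1)]
  final_sort.flatMap (fun items => items.map (fun item => item.2.2.2.2))

-- ===== PORT B =====
-- labels[-1] is ported as getLastD 0: the Python list starts as [0] and only grows, so it is never empty.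
def ProperSortString_alt (smushedBlox : List PvItem) (lineSpaceVal : Int) : List String :=
  let breaks := (List.zip smushedBlox (PySem.List.slice smushedBlox (some 1) none)).map
    (fun ab => !(ab.2.2.2.2.1 == ab.1.2.2.2.1 || decide (|ab.2.2.2.2.1 - ab.1.2.2.2.1| ≤ lineSpaceVal)))
  let labels := breaks.foldl
    (fun labs br => labs ++ [labs.getLastD 0 + (if br then 1 else 0)]) [(0 : Int)]
  let pairs := PySem.List.sorted2 (List.zip labels smushedBlox) (fun p => p.1) (fun p => p.2.1)
  pairs.map (fun p => p.2.2.2.2.2)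

-- ===== PRECONDITION & SPEC =====
def Spec_ProperSortString (smushedBlox : List (Int × Int × Int × Int × String)) (lineSpaceVal : Int) (out : List String) : Prop := out = ProperSortString_alt smushedBlox lineSpaceVal
instance (smushedBlox : List (Int × Int × Int × Int × String)) (lineSpaceVal : Int) (out : List String) : Decidable (Spec_ProperSortString smushedBlox lineSpaceVal out) := by unfold Spec_ProperSortString; infer_instance

-- ===== CLAIM (what is proved, stated in full; the proofs are below) =====
def Claim_equal_ProperSortString : Prop := ∀ (smushedBlox : List (Int × Int × Int × Int × String)) (lineSpaceVal : Int), Dom_ProperSortString smushedBlox lineSpaceVal → Spec_ProperSortString smushedBlox lineSpaceVal (ProperSortString smushedBlox lineSpaceVal)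

-- ===== LEMMAS AND PROOFS =====

-- "is item on the same line as prev" (the disjunction of A's two elif tests / B's un-negated break test)
def pvSame (lineSpaceVal : Int) (prev item : PvItem) : Bool :=
  item.2.2.2.1 == prev.2.2.2.1 || |item.2.2.2.1 - prev.2.2.2.1| ≤ lineSpaceVal

-- fold over a list together with the previous element
def pvFoldlPrev {σ : Type} (f : PvItem → PvItem → σ → σ) (st : σ) (prev : PvItem) : List PvItem → σ
  | [] => st
  | x :: r => pvFoldlPrev f (f prev x st) x r

-- the line groups of the remaining input, given the pending group `sub` and previous item
def pvGroups (v : Int) (sub : List PvItem) (prev : PvItem) : List PvItem → List (List PvItem)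
  | [] => [sub]
  | x :: r => if pvSame v prev x then pvGroups v (sub ++ [x]) x r else sub :: pvGroups v [x] x r

-- label the groups consecutively starting at l
def pvTag (l : Int) : List (List PvItem) → List (Int × PvItem)
  | [] => []
  | g :: gs => g.map (fun i => (l, i)) ++ pvTag (l + 1) gs

-- the line label of each remaining item, given the previous item's label l
def pvLabels (v l : Int) (prev : PvItem) : List PvItem → List Int
  | [] => []
  | x :: r => if pvSame v prev x then l :: pvLabels v l x r else (l + 1) :: pvLabels v (l + 1) x r

-- generic: a foldl over `enumerate` whose step at positive index reads xs[ix-1] is a fold with `prev`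
theorem pv_enum_fold {σ : Type} (xs : List PvItem) (d0 : PvItem)
    (step : σ → Int × PvItem → σ) (f : PvItem → PvItem → σ → σ)
    (hstep : ∀ st (ix : Int) item, 1 ≤ ix →
      step st (ix, item) = f (PySem.List.pyGetD xs (ix - 1) d0) item st) :
    ∀ (suf pre : List PvItem) (prev : PvItem) (st : σ),
      xs = pre ++ suf → pre.getLast? = some prev →
      (PySem.List.enumerate suf (pre.length : Int)).foldl step st = pvFoldlPrev f st prev suf := by
  intro suf
  induction suf with
  | nil => intro pre prev st _ _; simp [PySem.List.enumerate_nil, pvFoldlPrev]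
  | cons x r ih =>
    intro pre prev st hxs hl
    have hpre : pre ≠ [] := by intro e; simp [e] at hl
    have hlen : 1 ≤ pre.length := List.length_pos_iff.mpr hpre
    rw [PySem.List.enumerate_cons, List.foldl_cons,
      hstep st (pre.length : Int) x (by exact_mod_cast hlen)]
    have hget : PySem.List.pyGetD xs ((pre.length : Int) - 1) d0 = prev := by
      rw [show ((pre.length : Int) - 1) = ((pre.length - 1 : Nat) : Int) from by omega,
        PySem.List.pyGetD_natCast, hxs, List.getD_eq_getElem?_getD,
        List.getElem?_append_left (by omega), ← List.getLast?_eq_getElem?, hl]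
      rfl
    rw [hget]
    have := ih (pre ++ [x]) x (f prev x st) (by rw [hxs]; simp) List.getLast?_concat
    simp only [List.length_append, List.length_cons, List.length_nil] at this
    push_cast at this
    simpa [pvFoldlPrev] using this

-- A's loop state: the flushed groups plus pending group equal pvGroups, with sorted groups
theorem pv_A_loop (v : Int) :
    ∀ (r : List PvItem) (prev : PvItem) (sub : List PvItem) (F : List (List PvItem)),
      (pvFoldlPrev (fun prev x (st : List (List PvItem) × List PvItem) =>
          if x.2.2.2.1 == prev.2.2.2.1 then (st.1, st.2 ++ [x])
          else if |x.2.2.2.1 - prev.2.2.2.1| ≤ v then (st.1, st.2 ++ [x])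
          else (st.1 ++ [PySem.List.sorted st.2 (fun y => y.1)], [x])) (F, sub) prev r).1
        ++ [PySem.List.sorted
             (pvFoldlPrev (fun prev x (st : List (List PvItem) × List PvItem) =>
          if x.2.2.2.1 == prev.2.2.2.1 then (st.1, st.2 ++ [x])
          else if |x.2.2.2.1 - prev.2.2.2.1| ≤ v then (st.1, st.2 ++ [x])
          else (st.1 ++ [PySem.List.sorted st.2 (fun y => y.1)], [x])) (F, sub) prev r).2 (fun y => y.1)]
      = F ++ (pvGroups v sub prev r).map (fun g => PySem.List.sorted g (fun y => y.1)) := by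
  intro r
  induction r with
  | nil => intro prev sub F; simp [pvFoldlPrev, pvGroups]
  | cons x r ih =>
    intro prev sub F
    simp only [pvFoldlPrev]
    by_cases heq : (x.2.2.2.1 == prev.2.2.2.1) = true
    · have hs : pvSame v prev x = true := by simp [pvSame]; left; simpa using heq
      rw [if_pos heq, ih x (sub ++ [x]) F,
        show pvGroups v sub prev (x :: r) = pvGroups v (sub ++ [x]) x r from by simp [pvGroups, hs]]
    · by_cases habs : |x.2.2.2.1 - prev.2.2.2.1| ≤ v
      · have hs : pvSame v prev x = true := by simp [pvSame]; right; exact habs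
        rw [if_neg heq, if_pos habs, ih x (sub ++ [x]) F,
          show pvGroups v sub prev (x :: r) = pvGroups v (sub ++ [x]) x r from by simp [pvGroups, hs]]
      · have hs : pvSame v prev x = false := by
          simp [pvSame]; exact ⟨by simpa using heq, not_le.mp habs⟩
        rw [if_neg heq, if_neg habs,
          ih x [x] (F ++ [PySem.List.sorted sub (fun y => y.1)]),
          show pvGroups v sub prev (x :: r) = sub :: pvGroups v [x] x r from by simp [pvGroups, hs]]
        simp

-- B's label loop: folding the break flags of prev :: r sums into pvLabels
theorem pv_labels_fold (v : Int) :
    ∀ (r : List PvItem) (prev : PvItem) (acc : List Int) (l : Int),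
      acc.getLastD 0 = l →
      ((List.zip (prev :: r) r).map (fun ab => !(pvSame v ab.1 ab.2))).foldl
          (fun labs br => labs ++ [labs.getLastD 0 + (if br then 1 else 0)]) acc
        = acc ++ pvLabels v l prev r := by
  intro r
  induction r with
  | nil => intro prev acc l _; simp [pvLabels]
  | cons x r ih =>
    intro prev acc l hl
    rw [List.zip_cons_cons, List.map_cons, List.foldl_cons]
    by_cases hs : pvSame v prev x = true
    · have : acc ++ [acc.getLastD 0 + (if (!(pvSame v prev x)) = true then (1:Int) else 0)]
          = acc ++ [l] := by simp [hs, -List.getLastD_eq_getLast?, hl]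
      rw [this, ih x (acc ++ [l]) l (by simp)]
      simp [pvLabels, hs]
    · have hs' : pvSame v prev x = false := by simpa using hs
      have : acc ++ [acc.getLastD 0 + (if (!(pvSame v prev x)) = true then (1:Int) else 0)]
          = acc ++ [l + 1] := by simp [hs', -List.getLastD_eq_getLast?, hl]
      rw [this, ih x (acc ++ [l + 1]) (l + 1) (by simp)]
      simp [pvLabels, hs']

-- tagging the groups is the pending group's labels followed by zipping the items with their labels
theorem pv_tag_groups (v : Int) :
    ∀ (r : List PvItem) (prev : PvItem) (sub : List PvItem) (l : Int),
      pvTag l (pvGroups v sub prev r)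
        = sub.map (fun i => (l, i)) ++ List.zip (pvLabels v l prev r) r := by
  intro r
  induction r with
  | nil => intro prev sub l; simp [pvGroups, pvTag, pvLabels]
  | cons x r ih =>
    intro prev sub l
    by_cases hs : pvSame v prev x = true
    · rw [show pvGroups v sub prev (x :: r) = pvGroups v (sub ++ [x]) x r from by
        simp [pvGroups, hs], ih x (sub ++ [x]) l]
      simp [pvLabels, hs, List.zip_cons_cons]
    · have hs' : pvSame v prev x = false := by simpa using hs
      rw [show pvGroups v sub prev (x :: r) = sub :: pvGroups v [x] x r from by
        simp [pvGroups, hs']]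
      simp only [pvTag, ih x [x] (l + 1)]
      simp [pvLabels, hs', List.zip_cons_cons]

-- labels in pvTag l gs are ≥ l
theorem pv_tag_le : ∀ gs (l : Int), ∀ p ∈ pvTag l gs, l ≤ p.1 := by
  intro gs
  induction gs with
  | nil => intro l p hp; simp [pvTag] at hp
  | cons g gs ih =>
    intro l p hp
    simp only [pvTag, List.mem_append, List.mem_map] at hp
    rcases hp with ⟨i, _, rfl⟩ | hp
    · exact le_refl l
    · exact le_trans (by omega) (ih (l + 1) p hp)

def pvLt2 (p q : Int × PvItem) : Bool :=
  decide (p.1 < q.1) || !decide (q.1 < p.1) && decide (p.2.1 < q.2.1)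

def pvLt0 (x y : PvItem) : Bool := decide (x.1 < y.1)

theorem pv_sorted2_eq (xs : List (Int × PvItem)) :
    PySem.List.sorted2 xs (fun p => p.1) (fun p => p.2.1)
      = xs.foldl (fun acc x => PySem.List.insertBy pvLt2 x acc) [] := rfl

theorem pv_sorted_eq (g : List PvItem) :
    PySem.List.sorted g (fun y => y.1)
      = g.foldl (fun acc x => PySem.List.insertBy pvLt0 x acc) [] := rfl

theorem pv_insert_skip {α : Type} (before : α → α → Bool) (x : α) :
    ∀ (ys zs : List α), (∀ y ∈ ys, before x y = false) →
      PySem.List.insertBy before x (ys ++ zs) = ys ++ PySem.List.insertBy before x zs := by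
  intro ys
  induction ys with
  | nil => intro zs _; rfl
  | cons y ys ih =>
    intro zs hy
    have h0 : before x y = false := hy y (List.mem_cons_self)
    simp [PySem.List.insertBy, h0, ih zs (fun z hz => hy z (List.mem_cons_of_mem _ hz))]

theorem pv_foldl_insert_prefix :
    ∀ (B : List (Int × PvItem)) (S c : List (Int × PvItem)),
      (∀ b ∈ B, ∀ a ∈ S, pvLt2 b a = false) →
      B.foldl (fun acc x => PySem.List.insertBy pvLt2 x acc) (S ++ c)
        = S ++ B.foldl (fun acc x => PySem.List.insertBy pvLt2 x acc) c := by
  intro B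
  induction B with
  | nil => intro S c _; rfl
  | cons b B ih =>
    intro S c hB
    simp only [List.foldl_cons]
    rw [pv_insert_skip pvLt2 b S c (hB b List.mem_cons_self),
      ih S _ (fun b' hb' => hB b' (List.mem_cons_of_mem _ hb'))]

theorem pv_insert_map (l : Int) (x : PvItem) :
    ∀ acc, PySem.List.insertBy pvLt2 (l, x) (acc.map (fun i => (l, i)))
      = (PySem.List.insertBy pvLt0 x acc).map (fun i => (l, i)) := by
  intro acc
  induction acc with
  | nil => rfl
  | cons y acc ih =>
    have hkey : pvLt2 (l, x) (l, y) = pvLt0 x y := by simp [pvLt2, pvLt0]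
    by_cases h : pvLt0 x y = true
    · simp [PySem.List.insertBy, hkey, h]
    · simp only [Bool.not_eq_true] at h
      simp [PySem.List.insertBy, hkey, h, ih]

theorem pv_foldl_block (l : Int) :
    ∀ (g acc : List PvItem),
      (g.map (fun i => (l, i))).foldl (fun a x => PySem.List.insertBy pvLt2 x a)
          (acc.map (fun i => (l, i)))
        = (g.foldl (fun a x => PySem.List.insertBy pvLt0 x a) acc).map (fun i => (l, i)) := by
  intro g
  induction g with
  | nil => intro acc; rfl
  | cons x g ih =>
    intro acc
    simp only [List.map_cons, List.foldl_cons]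
    rw [pv_insert_map l x acc, ih]

-- the global lexicographic sort of a tagged group list is the tagging of the per-group sorts
theorem pv_sorted2_tag (l : Int) (gs : List (List PvItem)) :
    PySem.List.sorted2 (pvTag l gs) (fun p => p.1) (fun p => p.2.1)
      = pvTag l (gs.map (fun g => PySem.List.sorted g (fun y => y.1))) := by
  induction gs generalizing l with
  | nil => rfl
  | cons g gs ih =>
    rw [pv_sorted2_eq]
    simp only [pvTag, List.foldl_append]
    rw [show ([] : List (Int × PvItem)) = (([] : List PvItem).map (fun i => (l, i))) from rfl,
      pv_foldl_block]
    have hS : ∀ b ∈ pvTag (l + 1) gs,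
        ∀ a ∈ (g.foldl (fun a x => PySem.List.insertBy pvLt0 x a) []).map (fun i => (l, i)),
        pvLt2 b a = false := by
      intro b hb a ha
      obtain ⟨i, _, rfl⟩ := List.mem_map.mp ha
      have hbl : l + 1 ≤ b.1 := pv_tag_le gs (l + 1) b hb
      have h1 : ¬ (b.1 < l) := by omega
      have h2 : l < b.1 := by omega
      simp [pvLt2, h1, h2]
    have hpref := pv_foldl_insert_prefix (pvTag (l + 1) gs) _ [] hS
    rw [List.append_nil] at hpref
    rw [hpref, ← pv_sorted2_eq, ih (l + 1)]
    simp [pvTag, pv_sorted_eq]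

theorem pv_tag_map_snd : ∀ gs (l : Int), (pvTag l gs).map (fun p : Int × PvItem => p.2) = gs.flatten := by
  intro gs
  induction gs with
  | nil => intro l; simp [pvTag]
  | cons g gs ih => intro l; simp [pvTag, ih (l + 1), List.map_map]

theorem pv_A_char (v : Int) (x : PvItem) (r : List PvItem) :
    ProperSortString (x :: r) v
      = ((pvGroups v [x] x r).map (fun g => PySem.List.sorted g (fun y => y.1))).flatMap
          (fun items => items.map (fun item => item.2.2.2.2)) := by
  have e1 : ProperSortString (x :: r) v =
      (fun st : List (List PvItem) × List PvItem =>
        (st.1 ++ [PySem.List.sorted st.2 (fun y => y.1)]).flatMap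
          (fun items => items.map (fun item => item.2.2.2.2)))
      (List.foldl
        (fun (st : List (List PvItem) × List PvItem) (p : Int × PvItem) =>
          if (p.1 == 0) = true then (st.1, st.2 ++ [p.2])
          else
            let prev := PySem.List.pyGetD (x :: r) (p.1 - 1) ((0, 0, 0, 0, "") : PvItem)
            if (p.2.2.2.2.1 == prev.2.2.2.1) = true then (st.1, st.2 ++ [p.2])
            else if |p.2.2.2.2.1 - prev.2.2.2.1| ≤ v then (st.1, st.2 ++ [p.2])
            else (st.1 ++ [PySem.List.sorted st.2 (fun y => y.1)], [p.2]))
        ([], [] ++ [x])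
        (PySem.List.enumerate r ((([x] : List PvItem).length : Nat) : Int))) := rfl
  rw [pv_enum_fold (x :: r) ((0, 0, 0, 0, "") : PvItem) _
    (fun prev y (st : List (List PvItem) × List PvItem) =>
      if (y.2.2.2.1 == (prev : PvItem).2.2.2.1) = true then (st.1, st.2 ++ [y])
      else if |y.2.2.2.1 - prev.2.2.2.1| ≤ v then (st.1, st.2 ++ [y])
      else (st.1 ++ [PySem.List.sorted st.2 (fun z => z.1)], [y]))
    (by
      intro st ix item hix
      dsimp only
      rw [if_neg (by simp; omega)])
    r [x] x ([], [] ++ [x]) rfl rfl] at e1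
  dsimp only at e1
  rw [pv_A_loop v r x ([] ++ [x]) []] at e1
  simpa using e1

theorem pv_B_char (v : Int) (x : PvItem) (r : List PvItem) :
    ProperSortString_alt (x :: r) v
      = (PySem.List.sorted2 (pvTag 0 (pvGroups v [x] x r)) (fun p => p.1) (fun p => p.2.1)).map
          (fun p => p.2.2.2.2.2) := by
  have e1 : ProperSortString_alt (x :: r) v =
      (PySem.List.sorted2
        (List.zip
          (((List.zip (x :: r) (PySem.List.slice (x :: r) (some 1) none)).map
              (fun ab => !(pvSame v ab.1 ab.2))).foldl
            (fun labs br => labs ++ [labs.getLastD 0 + (if br then 1 else 0)]) [(0 : Int)])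
          (x :: r))
        (fun p => p.1) (fun p => p.2.1)).map (fun p => p.2.2.2.2.2) := rfl
  rw [e1, PySem.List.slice_from_one, List.tail_cons,
    pv_labels_fold v r x [(0 : Int)] 0 rfl,
    pv_tag_groups v r x [x] 0]
  simp [List.zip_cons_cons]

-- ===== VERDICT =====
theorem ProperSortString_spec : Claim_equal_ProperSortString := by
  intro xs v _
  unfold Spec_ProperSortString
  cases xs with
  | nil => rfl
  | cons x r =>
    rw [pv_A_char, pv_B_char, pv_sorted2_tag,
      show ((fun p : Int × PvItem => p.2.2.2.2.2)
          = (fun item : PvItem => item.2.2.2.2) ∘ (fun p : Int × PvItem => p.2)) from rfl,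
      ← List.map_map, pv_tag_map_snd]
    simp [List.flatMap_def, List.map_flatten]
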